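-- pv_equiv track=rewrite | github.com/Cosis94/PDFCom2Tab | extract_pdf_comments.py | vertices_to_quads
-- ===== SOURCE A (Python) =====
-- def vertices_to_quads(vertices):
--     """
--     Wandelt eine Vertices Liste in 4er Blöcke um.
--     Bei Highlight und StrikeOut liegt pro Textzeile meist ein Quad vor.
--     """
--     if not vertices:
--         return []
--
--     quads = []
--     for i in range(0, len(vertices), 4):
--         quad = vertices[i:i + 4]
--         if len(quad) == 4:
--             quads.append(quad)
--     return quads
-- ===== SOURCE B (Python) =====
-- def vertices_to_quads(vertices):
--     """
--     Wandelt eine Vertices Liste in 4er Bloecke um.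
--     Single pass: buffer each vertex; emit the buffer whenever it reaches 4.
--     A trailing partial buffer is never emitted.
--     """
--     quads = []
--     buf = []
--     for v in vertices:
--         buf.append(v)
--         if len(buf) == 4:
--             quads.append(buf)
--             buf = []
--     return quads
-- ===== Notes on version B (the rewrite author's own statement) =====
-- stated objective: simpler
-- what changed: Replaced the index-stepped range(0,n,4) loop with slicing and a length test by a single element-wise pass that accumulates a running 4-element buffer and flushes it when full; the trailing partial buffer is never emitted, matching A's discard of short slices.
import Mathlib
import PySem

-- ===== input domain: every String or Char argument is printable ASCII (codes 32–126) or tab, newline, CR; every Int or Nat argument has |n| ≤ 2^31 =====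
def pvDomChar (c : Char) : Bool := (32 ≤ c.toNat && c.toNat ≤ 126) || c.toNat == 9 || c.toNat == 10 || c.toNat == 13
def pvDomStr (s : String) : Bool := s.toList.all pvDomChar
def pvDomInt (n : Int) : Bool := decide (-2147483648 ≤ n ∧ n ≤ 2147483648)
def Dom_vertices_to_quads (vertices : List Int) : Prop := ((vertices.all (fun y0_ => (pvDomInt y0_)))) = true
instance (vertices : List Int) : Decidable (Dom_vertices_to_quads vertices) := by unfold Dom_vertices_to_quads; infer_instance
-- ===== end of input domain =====

-- B replaces A's index-stepped slicing loop by a single element-wise pass with a running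
-- 4-element buffer (simpler decomposition; same O(n) cost, same dropped trailing partial group).

-- ===== PORT A =====
def vertices_to_quads (vertices : List Int) : List (List Int) :=
  if vertices = [] then []
  else
    (PySem.List.pyRange 0 (vertices.length : Int) 4).foldl
      (fun quads i =>
        let quad := PySem.List.slice vertices (some i) (some (i + 4))
        if quad.length = 4 then quads ++ [quad] else quads)
      []

-- ===== PORT B =====
def vertices_to_quads_alt (vertices : List Int) : List (List Int) :=
  (vertices.foldl
    (fun (st : List (List Int) × List Int) v =>
      let buf := st.2 ++ [v]
      if buf.length = 4 then (st.1 ++ [buf], ([] : List Int)) else (st.1, buf))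
    ([], [])).1

-- ===== PRECONDITION & SPEC =====
def Spec_vertices_to_quads (vertices : List Int) (out : List (List Int)) : Prop := out = vertices_to_quads_alt vertices
instance (vertices : List Int) (out : List (List Int)) : Decidable (Spec_vertices_to_quads vertices out) := by unfold Spec_vertices_to_quads; infer_instance

-- ===== CLAIM (what is proved, stated in full; the proofs are below) =====
def Claim_equal_vertices_to_quads : Prop := ∀ (vertices : List Int), Dom_vertices_to_quads vertices → Spec_vertices_to_quads vertices (vertices_to_quads vertices)

-- ===== LEMMAS AND PROOFS =====

/-- Reference chunking: successive complete blocks of four, trailing partial block dropped. -/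
def chunk4 : List Int → List (List Int)
  | a :: b :: c :: d :: t => [a, b, c, d] :: chunk4 t
  | _ => []

theorem foldB : ∀ (xs : List Int) (acc : List (List Int)),
    (xs.foldl
      (fun (st : List (List Int) × List Int) v =>
        let buf := st.2 ++ [v]
        if buf.length = 4 then (st.1 ++ [buf], ([] : List Int)) else (st.1, buf))
      (acc, [])).1 = acc ++ chunk4 xs
  | [], acc => by simp [chunk4]
  | [a], acc => by simp [List.foldl, chunk4]
  | [a, b], acc => by simp [List.foldl, chunk4]
  | [a, b, c], acc => by simp [List.foldl, chunk4]
  | a :: b :: c :: d :: t, acc => by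
      show (t.foldl
          (fun (st : List (List Int) × List Int) v =>
            let buf := st.2 ++ [v]
            if buf.length = 4 then (st.1 ++ [buf], ([] : List Int)) else (st.1, buf))
          (acc ++ [[a, b, c, d]], [])).1 = acc ++ chunk4 (a :: b :: c :: d :: t)
      rw [foldB t (acc ++ [[a, b, c, d]])]
      simp [chunk4]

theorem foldA : ∀ (xs : List Int) (acc : List (List Int)),
    ((List.range ((xs.length + 3) / 4)).foldl
      (fun acc k =>
        if ((xs.drop (4 * k)).take 4).length = 4 then acc ++ [(xs.drop (4 * k)).take 4]
        else acc) acc)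
      = acc ++ chunk4 xs
  | [], acc => by simp [chunk4]
  | [a], acc => by simp [List.range_succ, chunk4]
  | [a, b], acc => by simp [List.range_succ, chunk4]
  | [a, b, c], acc => by simp [List.range_succ, chunk4]
  | a :: b :: c :: d :: t, acc => by
      have hcnt : ((a :: b :: c :: d :: t).length + 3) / 4 = (t.length + 3) / 4 + 1 := by
        simp only [List.length_cons]; omega
      rw [hcnt, List.range_succ_eq_map, List.foldl_cons, List.foldl_map]
      have hdrop : ∀ k : Nat, (a :: b :: c :: d :: t).drop (4 * (k + 1)) = t.drop (4 * k) := by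
        intro k
        have h4 : 4 * (k + 1) = 4 + 4 * k := by ring
        rw [h4, ← List.drop_drop]
        simp
      simp only [Nat.mul_zero, List.drop_zero, Nat.succ_eq_add_one, hdrop]
      show (List.range ((t.length + 3) / 4)).foldl
          (fun acc k =>
            if ((t.drop (4 * k)).take 4).length = 4 then acc ++ [(t.drop (4 * k)).take 4]
            else acc)
          (acc ++ [[a, b, c, d]])
        = acc ++ chunk4 (a :: b :: c :: d :: t)
      rw [foldA t (acc ++ [[a, b, c, d]])]
      simp [chunk4]

theorem A_eq_chunk (xs : List Int) : vertices_to_quads xs = chunk4 xs := by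
  unfold vertices_to_quads
  split_ifs with h
  · subst h; simp [chunk4]
  · have hn : (0 : Int) < (xs.length : Int) := by
      cases xs with
      | nil => exact absurd rfl h
      | cons y ys => simp
    rw [PySem.List.pyRange_of_pos 0 (xs.length : Int) (by norm_num : (0 : Int) < 4),
        if_pos hn, List.foldl_map]
    have hcnt : (((xs.length : Int) - 0 + 4 - 1) / 4).toNat = (xs.length + 3) / 4 := by omega
    rw [hcnt]
    have hfun : (fun (quads : List (List Int)) (k : Nat) =>
        let quad := PySem.List.slice xs (some ((0 : Int) + 4 * (k : Int)))
          (some ((0 : Int) + 4 * (k : Int) + 4));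
        if quad.length = 4 then quads ++ [quad] else quads)
      = (fun (acc : List (List Int)) (k : Nat) =>
        if ((xs.drop (4 * k)).take 4).length = 4 then acc ++ [(xs.drop (4 * k)).take 4]
        else acc) := by
      funext acc k
      have h2 : ((0 : Int) + 4 * (k : Int) + 4) = ((4 * k : Nat) : Int) + ((4 : Nat) : Int) := by
        push_cast; ring
      have h1 : ((0 : Int) + 4 * (k : Int)) = ((4 * k : Nat) : Int) := by push_cast; ring
      rw [h2, h1, PySem.List.slice_natCast_add]
    rw [hfun, foldA]
    simp

theorem B_eq_chunk (xs : List Int) : vertices_to_quads_alt xs = chunk4 xs := by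
  unfold vertices_to_quads_alt
  rw [foldB]
  simp

-- ===== VERDICT (by name: the statement is the Claim_ definition above) =====
theorem vertices_to_quads_spec : Claim_equal_vertices_to_quads := by
  intro xs _
  unfold Spec_vertices_to_quads
  rw [A_eq_chunk, B_eq_chunk]
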